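-- pv_equiv track=rewrite | github.com/bono039/algorithm-study | week13/BOJ_21611/마법사상어와블리자드_강아현.py | check_four
-- ===== SOURCE A (Python) =====
-- def check_four(l,marbles): # 구슬 폭발
--     now, cnt = 0, 0
--     for i in range(len(l)):
--         if now != l[i]:
--             if cnt >= 4:
--                 marbles[l[i-1]-1] += cnt
--                 l[i-cnt:i] = [0]*cnt
--             now, cnt = l[i], 1
--         elif now == l[i]:
--             cnt += 1
--             if cnt >= 4:
--                 if i == len(l)-1:
--                     marbles[l[i]-1] += cnt
--                     l[i-cnt+1:i+1] = [0]*cnt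
--     remove_l = [l[i] for i in range(len(l)) if l[i] > 0]
--     return remove_l
-- ===== SOURCE B (Python) =====
-- def check_four(l, marbles):
--     out = []
--     i, n = 0, len(l)
--     while i < n:
--         j = i + 1
--         while j < n and l[j] == l[i]:
--             j += 1
--         run = j - i
--         if run >= 4:
--             marbles[l[i] - 1] += run
--         elif l[i] > 0:
--             out += [l[i]] * run
--         i = j
--     return out
-- ===== Notes on version B (the rewrite author's own statement) =====
-- stated objective: simpler
-- what changed: Replaces A's per-index now/cnt state machine with slice-assignment zeroing and a last-index special case by a single run-grouping scan: each maximal run of equal marbles is measured once and either credited to marbles (run >= 4) or appended to the output, so the i-cnt slice arithmetic, the in-place zeroing of l and the end-of-list special case disappear.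
import Mathlib
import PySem

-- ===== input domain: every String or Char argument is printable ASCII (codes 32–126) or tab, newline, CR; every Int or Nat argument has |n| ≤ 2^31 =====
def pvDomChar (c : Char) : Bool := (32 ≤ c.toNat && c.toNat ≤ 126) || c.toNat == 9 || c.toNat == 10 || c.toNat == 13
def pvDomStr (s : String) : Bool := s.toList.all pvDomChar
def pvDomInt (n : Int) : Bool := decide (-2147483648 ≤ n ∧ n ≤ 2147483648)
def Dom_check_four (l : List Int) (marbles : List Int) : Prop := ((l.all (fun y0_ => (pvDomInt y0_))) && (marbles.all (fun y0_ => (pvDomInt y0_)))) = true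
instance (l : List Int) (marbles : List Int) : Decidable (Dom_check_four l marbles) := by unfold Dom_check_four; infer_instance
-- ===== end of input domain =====

-- B replaces A's index/counter state machine (with in-place slice zeroing of l) by a single
-- run-grouping scan; equivalence is about the RETURN value: A also zeroes exploded runs of l
-- in place, which B does not do (both perform the same marbles[v-1] += run updates).

-- ===== PORT A =====
-- marbles[idx] += c with Python's negative indexing; an out-of-range idx is an IndexError
-- in Python, excluded by Pre_ (marbles never influences the returned value).
def pvAddAt (m : List Int) (idx c : Int) : List Int :=
  let j := if idx < 0 then idx + m.length else idx
  if 0 ≤ j ∧ j < m.length then m.set j.toNat (m.getD j.toNat 0 + c) else m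

-- l[a:b] = v (slice assignment); at every executed call 0 ≤ a ≤ b ≤ len l, where .toNat is exact.
def pvSetSlice (l : List Int) (a b : Int) (v : List Int) : List Int :=
  l.take a.toNat ++ v ++ l.drop b.toNat

-- the for-loop over range(len(l)): state now, cnt and the mutated lists l, marbles
def aLoop (n i : Nat) (now cnt : Int) (l marbles : List Int) : List Int × List Int :=
  if h : i < n then
    let x := PySem.List.pyGetD l (i : Int) 0    -- l[i]; i < len l at every executed call
    if now ≠ x then
      let lm :=
        if cnt ≥ 4 then
          (pvSetSlice l ((i : Int) - cnt) (i : Int) (List.replicate cnt.toNat 0),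
           pvAddAt marbles (PySem.List.pyGetD l ((i : Int) - 1) 0 - 1) cnt)
        else (l, marbles)
      aLoop n (i + 1) x 1 lm.1 lm.2
    else
      let cnt := cnt + 1
      let lm :=
        if cnt ≥ 4 ∧ i = n - 1 then
          (pvSetSlice l ((i : Int) - cnt + 1) ((i : Int) + 1) (List.replicate cnt.toNat 0),
           pvAddAt marbles (x - 1) cnt)
        else (l, marbles)
      aLoop n (i + 1) now cnt lm.1 lm.2
  else (l, marbles)
termination_by n - i

def check_four (l : List Int) (marbles : List Int) : List Int :=
  ((aLoop l.length 0 0 0 l marbles).1).filter (fun x => decide (0 < x))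

-- ===== PORT B =====
-- the inner while: number of leading elements of the tail equal to l[i]
def leadCount (v : Int) : List Int → Nat
  | [] => 0
  | x :: t => if x = v then leadCount v t + 1 else 0

-- the outer while: one step per maximal run
def bRun (l marbles : List Int) : List Int :=
  match l with
  | [] => []
  | x :: t =>
    let k := leadCount x t
    let run := k + 1
    let rest := t.drop k
    if 4 ≤ run then bRun rest (pvAddAt marbles (x - 1) (run : Int))
    else (if 0 < x then List.replicate run x else []) ++ bRun rest marbles
termination_by l.length
decreasing_by all_goals (rw [List.length_drop, List.length_cons]; omega)

def check_four_alt (l : List Int) (marbles : List Int) : List Int := bRun l marbles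

-- ===== PRECONDITION & SPEC =====
-- Pre_ excludes exactly the inputs on which A raises IndexError: four consecutive equal elements
-- (a window of a run of >= 4 equal marbles, value v = l[i]) make A execute marbles[v-1] += run,
-- which raises unless -len(marbles) <= v-1 < len(marbles) (Python's negative indexing).
def Pre_check_four (l : List Int) (marbles : List Int) : Prop :=
  ∀ i ∈ List.range l.length, i + 3 < l.length →
    (l.getD i 0 = l.getD (i + 1) 0 ∧ l.getD (i + 1) 0 = l.getD (i + 2) 0 ∧
     l.getD (i + 2) 0 = l.getD (i + 3) 0) →
    (-(marbles.length : Int) ≤ l.getD i 0 - 1 ∧ l.getD i 0 - 1 < (marbles.length : Int))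
instance (l : List Int) (marbles : List Int) : Decidable (Pre_check_four l marbles) := by
  unfold Pre_check_four; infer_instance

def pvWitness_check_four : List Int × List Int := ([1, 1, 2, 3, 3], [0, 5])

def Spec_check_four (l : List Int) (marbles : List Int) (out : List Int) : Prop := out = check_four_alt l marbles
instance (l : List Int) (marbles : List Int) (out : List Int) : Decidable (Spec_check_four l marbles out) := by unfold Spec_check_four; infer_instance

-- ===== CLAIM (what is proved, stated in full; the proofs are below) =====
def Claim_equal_check_four : Prop := ∀ (l : List Int) (marbles : List Int), Dom_check_four l marbles → Pre_check_four l marbles → Spec_check_four l marbles (check_four l marbles)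

-- ===== LEMMAS AND PROOFS =====

-- abstraction of A's loop from a run boundary: pending run of value v, length c; suffix s untouched
def pvG (v : Int) (c : Nat) : List Int → List Int
  | [] => (List.replicate c v).filter (fun x => decide (0 < x))
  | x :: t =>
    if v ≠ x then
      (if 4 ≤ c then [] else (List.replicate c v).filter (fun x => decide (0 < x))) ++ pvG x 1 t
    else if 4 ≤ c + 1 ∧ t = [] then [] else pvG v (c + 1) t

theorem bRun_marbles : ∀ (l m m' : List Int), bRun l m = bRun l m'
  | [], _, _ => by rw [bRun, bRun]
  | x :: t, m, m' => by
    rw [bRun, bRun]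
    have ih := bRun_marbles (t.drop (leadCount x t))
    split
    · exact ih _ _
    · rw [ih m m']
termination_by l => l.length
decreasing_by all_goals (rw [List.length_drop, List.length_cons]; omega)

theorem aLoop_char (s : List Int) : ∀ (Q : List Int) (v : Int) (c : Nat) (marbles : List Int) (n i : Nat),
    i = Q.length + c → n = i + s.length →
    ((aLoop n i v (c : Int) (Q ++ (List.replicate c v ++ s)) marbles).1).filter (fun x => decide (0 < x))
      = Q.filter (fun x => decide (0 < x)) ++ pvG v c s := by
  induction s with
  | nil =>
    intro Q v c marbles n i hi hn
    simp only [List.length_nil] at hn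
    rw [aLoop, dif_neg (by omega : ¬ i < n)]
    simp [pvG, List.filter_append]
  | cons x t ih =>
    intro Q v c marbles n i hi hn
    simp only [List.length_cons] at hn
    have hP : (Q ++ List.replicate c v).length = i := by
      simp [List.length_append, List.length_replicate]; omega
    have hassoc : Q ++ (List.replicate c v ++ x :: t) = (Q ++ List.replicate c v) ++ x :: t :=
      (List.append_assoc _ _ _).symm
    have hx : PySem.List.pyGetD (Q ++ (List.replicate c v ++ x :: t)) (i : Int) 0 = x := by
      rw [hassoc, PySem.List.pyGetD_natCast, ← hP, List.getD_append_right _ _ _ _ (le_refl _)]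
      simp
    have hlt : i < n := by omega
    rw [aLoop, dif_pos hlt]
    simp only [hx]
    by_cases hvx : v = x
    · -- equal branch (elif)
      rw [if_neg (by simp [hvx])]
      subst hvx
      by_cases hend : 4 ≤ c + 1 ∧ t = []
      · obtain ⟨h4, ht⟩ := hend
        subst ht
        simp only [List.length_nil] at hn
        have hcond : (4 : Int) ≤ (c : Int) + 1 ∧ i = n - 1 := by
          constructor
          · exact_mod_cast h4
          · omega
        rw [if_pos hcond]
        have hsl : pvSetSlice (Q ++ (List.replicate c v ++ [v])) ((i : Int) - ((c : Int) + 1) + 1)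
            ((i : Int) + 1) (List.replicate ((c : Int) + 1).toNat 0)
            = Q ++ (List.replicate (c + 1) 0 ++ []) := by
          unfold pvSetSlice
          have e1 : ((i : Int) - ((c : Int) + 1) + 1).toNat = Q.length := by omega
          have e2 : ((i : Int) + 1).toNat = i + 1 := by omega
          have e3 : ((c : Int) + 1).toNat = c + 1 := by omega
          rw [e1, e2, e3]
          have hlen : (Q ++ (List.replicate c v ++ [v])).length = i + 1 := by
            simp [List.length_append, List.length_replicate]; omega
          rw [List.take_left, List.drop_eq_nil_of_le (by omega)]
          simp
        simp only [hsl]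
        rw [aLoop, dif_neg (by omega : ¬ i + 1 < n)]
        rw [pvG]
        rw [if_neg (by simp)]
        rw [if_pos ⟨h4, rfl⟩]
        simp [List.filter_append]
      · have hcond : ¬ ((4 : Int) ≤ (c : Int) + 1 ∧ i = n - 1) := by
          intro ⟨a, b⟩
          apply hend
          constructor
          · exact_mod_cast a
          · have : t.length = 0 := by omega
            exact List.length_eq_zero_iff.mp this
        rw [if_neg hcond]
        have hsh : Q ++ (List.replicate c v ++ v :: t) = Q ++ (List.replicate (c + 1) v ++ t) := by
          rw [List.replicate_succ']
          simp
        rw [hsh]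
        have hrec := ih Q v (c + 1) marbles n (i + 1) (by omega) (by omega)
        push_cast at hrec
        rw [hrec, pvG]
        rw [if_neg (by simp), if_neg hend]
    · -- now ≠ l[i] branch
      rw [if_pos hvx]
      by_cases h4 : (4 : Int) ≤ (c : Int)
      · have h4c : 4 ≤ c := by exact_mod_cast h4
        rw [if_pos h4]
        have hsl : pvSetSlice (Q ++ (List.replicate c v ++ x :: t)) ((i : Int) - (c : Int))
            (i : Int) (List.replicate ((c : Int)).toNat 0)
            = Q ++ (List.replicate c 0 ++ x :: t) := by
          unfold pvSetSlice
          have e1 : ((i : Int) - (c : Int)).toNat = Q.length := by omega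
          have e2 : ((i : Int)).toNat = i := by omega
          have e3 : ((c : Int)).toNat = c := by omega
          rw [e1, e2, e3, List.take_left, hassoc, ← hP, List.drop_left]
          simp
        simp only [hsl]
        have hsh : Q ++ (List.replicate c 0 ++ x :: t)
            = (Q ++ List.replicate c 0) ++ ([x] ++ t) := by simp
        rw [hsh]
        have hrec := ih (Q ++ List.replicate c 0) x 1 (pvAddAt marbles
            (PySem.List.pyGetD (Q ++ (List.replicate c v ++ x :: t)) ((i : Int) - 1) 0 - 1) (c : Int))
            n (i + 1) (by simp [List.length_append, List.length_replicate]; omega)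
            (by omega)
        push_cast at hrec
        rw [hrec, pvG]
        rw [if_pos hvx, if_pos h4c]
        simp [List.filter_append]
      · have h4c : ¬ 4 ≤ c := by omega
        rw [if_neg h4]
        have hsh : Q ++ (List.replicate c v ++ x :: t)
            = (Q ++ List.replicate c v) ++ ([x] ++ t) := by simp
        rw [hsh]
        have hrec := ih (Q ++ List.replicate c v) x 1 marbles n (i + 1)
            (by simp [List.length_append, List.length_replicate]; omega)
            (by omega)
        push_cast at hrec
        rw [hrec, pvG]
        rw [if_pos hvx, if_neg h4c]
        simp [List.filter_append]

theorem pvG_bRun : ∀ (s : List Int) (v : Int) (c : Nat) (m : List Int), ¬(4 ≤ c ∧ s = []) →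
    pvG v c s =
      (if 4 ≤ c + leadCount v s then []
       else (List.replicate (c + leadCount v s) v).filter (fun x => decide (0 < x)))
        ++ bRun (s.drop (leadCount v s)) m
  | [], v, c, m, h => by
    simp only [leadCount, List.drop_nil, Nat.add_zero, pvG]
    rw [bRun]
    have hc : ¬ 4 ≤ c := by simpa using h
    simp [hc]
  | x :: t, v, c, m, h => by
    by_cases hvx : v = x
    · subst hvx
      rw [pvG]
      simp only [ne_eq, not_true_eq_false, if_false, leadCount, if_true, List.drop_succ_cons]
      by_cases hend : 4 ≤ c + 1 ∧ t = []
      · rw [if_pos hend]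
        obtain ⟨h4, ht⟩ := hend
        subst ht
        simp only [leadCount, List.drop_nil]
        rw [bRun]
        have : 4 ≤ c + (0 + 1) := by omega
        simp [this]
      · rw [if_neg hend]
        have ih := pvG_bRun t v (c + 1) m hend
        rw [ih]
        have e1 : c + (leadCount v t + 1) = c + 1 + leadCount v t := by omega
        rw [e1]
    · rw [pvG]
      rw [if_pos hvx]
      have hlc : leadCount v (x :: t) = 0 := by
        simp only [leadCount]
        rw [if_neg (fun he => hvx he.symm)]
      rw [hlc]
      simp only [Nat.add_zero, List.drop_zero]
      have ih := pvG_bRun t x 1 m (by simp)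
      rw [ih, bRun]
      by_cases h4 : 4 ≤ leadCount x t + 1
      · have h4' : 4 ≤ 1 + leadCount x t := by omega
        rw [if_pos h4, if_pos h4']
        rw [bRun_marbles _ m (pvAddAt m (x - 1) (↑(leadCount x t + 1)))]
        simp
      · have h4' : ¬ 4 ≤ 1 + leadCount x t := by omega
        rw [if_neg h4, if_neg h4']
        have e2 : 1 + leadCount x t = leadCount x t + 1 := by omega
        rw [e2]
        by_cases hx : (0 : Int) < x <;> simp [hx, List.filter_replicate]
termination_by s => s.length
decreasing_by all_goals (rw [List.length_cons]; omega)

theorem bRun_drop_zeros (l : List Int) (m : List Int) :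
    bRun l m = bRun (l.drop (leadCount 0 l)) m := by
  match l with
  | [] => rfl
  | x :: t =>
    by_cases hx : x = 0
    · subst hx
      rw [bRun]
      simp only [leadCount, if_true, List.drop_succ_cons]
      split
      · exact bRun_marbles _ _ _
      · simp
    · simp [leadCount, hx]

-- ===== VERDICT (by name: the statement is the Claim_ definition above) =====
theorem check_four_spec : Claim_equal_check_four := by
  intro l marbles _ _
  unfold Spec_check_four check_four check_four_alt
  have h1 := aLoop_char l [] 0 0 marbles l.length 0 (by simp) (by simp)
  simp at h1
  rw [h1]
  have h2 := pvG_bRun l 0 0 marbles (by simp)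
  simp at h2
  rw [h2, ← bRun_drop_zeros]
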